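-- pv_equiv track=rewrite | github.com/josipgrgic/advent-of-code | 2020/day-12/main.py | get_q
-- ===== SOURCE A (Python) =====
-- qs = [(1,1), (1,-1), (-1,-1), (-1,1)]
--
-- def get_q(wx, wy):
--     qx = 0
--     qy = 0
--
--     if (wx != 0):
--         qx = int(wx / abs(wx))
--
--     if (wy != 0):
--         qy = int(wy / abs(wy))
--
--     for i in range(0,len(qs)):
--         if ((qx == qs[i][0] or qx == 0) and (qy == qs[i][1] or qy == 0)):
--             return i
-- ===== SOURCE B (Python) =====
-- def get_q(wx, wy):
--     qx = 0
--     qy = 0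
--     if wx != 0:
--         qx = int(wx / abs(wx))
--     if wy != 0:
--         qy = int(wy / abs(wy))
--     if qx >= 0:
--         return 0 if qy >= 0 else 1
--     return 2 if qy <= 0 else 3
-- ===== Notes on version B (the rewrite author's own statement) =====
-- stated objective: simpler
-- what changed: Replaces the scan over the qs quadrant table (with or-zero wildcard matching per entry) by a direct conditional ladder on the two signs that computes the quadrant index in closed form.
import Mathlib
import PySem

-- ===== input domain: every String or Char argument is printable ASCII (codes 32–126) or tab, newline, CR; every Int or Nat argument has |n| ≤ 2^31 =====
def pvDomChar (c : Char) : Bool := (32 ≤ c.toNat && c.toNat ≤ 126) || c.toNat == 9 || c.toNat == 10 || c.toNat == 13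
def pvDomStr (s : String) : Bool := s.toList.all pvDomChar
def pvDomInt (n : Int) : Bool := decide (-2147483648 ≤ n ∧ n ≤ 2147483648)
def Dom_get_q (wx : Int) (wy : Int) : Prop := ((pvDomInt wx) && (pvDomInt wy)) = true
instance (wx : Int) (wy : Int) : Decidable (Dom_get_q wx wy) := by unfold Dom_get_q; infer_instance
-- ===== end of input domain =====

-- B replaces A's scan over the qs quadrant table by a direct conditional ladder on the two signs (simpler).


-- ===== PORT A =====
def qs : List (Int × Int) := [(1,1), (1,-1), (-1,-1), (-1,1)]

-- int(wx/abs(wx)) is exact here: |wx| divides wx, so float true division and int truncation give wx / |wx|.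
-- Python falls off the loop returning None only if no entry matches; with qx,qy ∈ {-1,0,1} an entry always
-- matches, so the [] case's default 0 is unreachable.
def getqLoop (qx qy : Int) : List (Int × Int) → Int → Int
  | [], _ => 0
  | (a, b) :: rest, i =>
      if (qx == a || qx == 0) && (qy == b || qy == 0) then i else getqLoop qx qy rest (i + 1)

def get_q (wx : Int) (wy : Int) : Int :=
  let qx : Int := if wx ≠ 0 then wx / |wx| else 0
  let qy : Int := if wy ≠ 0 then wy / |wy| else 0
  getqLoop qx qy qs 0

-- ===== PORT B =====
def get_q_alt (wx : Int) (wy : Int) : Int :=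
  let qx : Int := if wx ≠ 0 then wx / |wx| else 0
  let qy : Int := if wy ≠ 0 then wy / |wy| else 0
  if qx ≥ 0 then (if qy ≥ 0 then 0 else 1)
  else (if qy ≤ 0 then 2 else 3)

-- ===== PRECONDITION & SPEC =====
def Spec_get_q (wx : Int) (wy : Int) (out : Int) : Prop := out = get_q_alt wx wy
instance (wx : Int) (wy : Int) (out : Int) : Decidable (Spec_get_q wx wy out) := by unfold Spec_get_q; infer_instance

-- ===== CLAIM (what is proved, stated in full; the proofs are below) =====
def Claim_equal_get_q : Prop := ∀ (wx : Int) (wy : Int), Dom_get_q wx wy → Spec_get_q wx wy (get_q wx wy)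

-- ===== LEMMAS AND PROOFS =====
theorem sign_cases (w : Int) :
    (if w ≠ 0 then w / |w| else 0) = -1 ∨ (if w ≠ 0 then w / |w| else 0) = 0 ∨
    (if w ≠ 0 then w / |w| else 0) = 1 := by
  rcases lt_trichotomy w 0 with h | h | h
  · left
    rw [if_pos (by omega), abs_of_neg h, Int.ediv_neg, Int.ediv_self (by omega)]
  · right; left; simp [h]
  · right; right
    rw [if_pos (by omega), abs_of_pos h, Int.ediv_self (by omega)]

-- ===== VERDICT (by name: the statement is the Claim_ definition above) =====
theorem get_q_spec : Claim_equal_get_q := by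
  intro wx wy _
  unfold Spec_get_q get_q get_q_alt
  rcases sign_cases wx with hx | hx | hx <;> rcases sign_cases wy with hy | hy | hy <;>
    simp only [hx, hy] <;> norm_num [getqLoop, qs]
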